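-- pv_equiv track=rewrite | github.com/Marfung37/PC-Database | src/utils/queue_utils.py | mirror_queue
-- ===== SOURCE A (Python) =====
-- PIECEVALS = {
--     'T': 1,
--     'I': 2,
--     'L': 3,
--     'J': 4,
--     'S': 5,
--     'Z': 6,
--     'O': 7,
-- }
--
-- MIRRORPIECES = {
--     'L': 'J',
--     'J': 'L',
--     'S': 'Z',
--     'Z': 'S',
-- }
--
-- def sort_queue(queue: str) -> str:
--     '''
--     Sort a queue with TILJSZO ordering
--
--     Parameter:
--         queue (str): A queue with pieces in {T,I,L,J,S,Z,O}
--
--     Return: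
--         str: a sorted queue following TILJSZO ordering
--
--     '''
--
--     sorted_queue_gen = sorted(queue, key=lambda x: PIECEVALS[x])
--     sorted_queue = ''.join(list(sorted_queue_gen))
--
--     return sorted_queue
--
-- def mirror_queue(queue: str) -> str:
--     '''
--     Mirrors the pieces in the queue and sorts them again
--
--     Parameter:
--         queue (str): A queue with pieces in {T,I,L,J,S,Z,O}
--
--     Return:
--         str: the pieces mirrored and sorted again
--
--     '''
--
--     new_queue = ""
--
--     # go through each piece and change to mirror if there is one
--     for piece in queue:
--         if piece in MIRRORPIECES:
--             new_queue += MIRRORPIECES[piece]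
--         else:
--             new_queue += piece
--
--     return sort_queue(new_queue)
-- ===== SOURCE B (Python) =====
-- MIRRORPIECES = {
--     'L': 'J',
--     'J': 'L',
--     'S': 'Z',
--     'Z': 'S',
-- }
--
-- def mirror_queue(queue: str) -> str:
--     # counting sort: bucket the mirrored pieces, then emit in TILJSZO order
--     counts = {p: 0 for p in 'TILJSZO'}
--     for piece in queue:
--         counts[MIRRORPIECES.get(piece, piece)] += 1
--     return ''.join(p * counts[p] for p in 'TILJSZO')
-- ===== Notes on version B (the rewrite author's own statement) =====
-- stated objective: alternative
-- what changed: Replaces A's comparison sort (sorted with a PIECEVALS key) by a single counting pass that buckets the mirrored pieces and rebuilds the output in fixed TILJSZO order (counting sort).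
import Mathlib
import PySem

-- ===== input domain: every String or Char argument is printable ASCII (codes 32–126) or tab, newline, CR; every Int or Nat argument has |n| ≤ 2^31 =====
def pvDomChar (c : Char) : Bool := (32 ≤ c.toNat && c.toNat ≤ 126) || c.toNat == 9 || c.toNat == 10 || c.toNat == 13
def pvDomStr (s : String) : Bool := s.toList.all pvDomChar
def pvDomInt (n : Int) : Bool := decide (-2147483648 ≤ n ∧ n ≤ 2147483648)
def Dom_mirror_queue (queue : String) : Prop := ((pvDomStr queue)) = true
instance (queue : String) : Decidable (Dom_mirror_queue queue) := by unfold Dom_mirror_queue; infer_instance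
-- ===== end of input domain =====

-- B replaces A's comparison sort of the mirrored queue by a counting sort over the seven piece types (objective: alternative algorithm; speed not measured here).

-- ===== PORT A =====
def PIECEVALS : PySem.Dict Char Int :=
  PySem.Dict.ofList [('T', 1), ('I', 2), ('L', 3), ('J', 4), ('S', 5), ('Z', 6), ('O', 7)]

def MIRRORPIECES : PySem.Dict Char Char :=
  PySem.Dict.ofList [('L', 'J'), ('J', 'L'), ('S', 'Z'), ('Z', 'S')]

-- sorted(queue, key=lambda x: PIECEVALS[x]); the KeyError of PIECEVALS[x] on a piece
-- outside the dict is excluded by Pre_, so getD with a dummy default is exact there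
def sort_queue (queue : String) : String :=
  String.ofList (PySem.List.sorted queue.toList (fun x => PySem.Dict.getD PIECEVALS x 0) false)

def mirror_queue (queue : String) : String :=
  let new_queue : List Char :=
    queue.toList.foldl
      (fun acc piece =>
        if PySem.Dict.contains MIRRORPIECES piece then
          acc ++ [PySem.Dict.getD MIRRORPIECES piece piece]
        else
          acc ++ [piece]) []
  sort_queue (String.ofList new_queue)

-- ===== PORT B =====
-- counts[m] += 1 raises KeyError when m is outside the seven initialized keys; that is
-- excluded by Pre_, so Dict.modify with a dummy default is exact there (likewise counts[p])
def mirror_queue_alt (queue : String) : String :=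
  let counts : PySem.Dict Char Int :=
    queue.toList.foldl
      (fun d piece =>
        let mirrored := PySem.Dict.getD MIRRORPIECES piece piece
        d.modify mirrored 0 (· + 1))
      (PySem.Dict.ofList [('T', 0), ('I', 0), ('L', 0), ('J', 0), ('S', 0), ('Z', 0), ('O', 0)])
  String.ofList (("TILJSZO".toList).flatMap
    (fun p => List.replicate (PySem.Dict.getD counts p 0).toNat p))

-- ===== PRECONDITION & SPEC =====
-- Pre_ excludes exactly the queues containing a character outside {T,I,L,J,S,Z,O}:
-- on those A raises KeyError in sorted(..., key=lambda x: PIECEVALS[x]).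
def Pre_mirror_queue (queue : String) : Prop :=
  queue.toList.all (fun c => c ∈ ['T', 'I', 'L', 'J', 'S', 'Z', 'O']) = true
instance (queue : String) : Decidable (Pre_mirror_queue queue) := by
  unfold Pre_mirror_queue; infer_instance

def pvWitness_mirror_queue : String := "LJSZTIO"

def Spec_mirror_queue (queue : String) (out : String) : Prop := out = mirror_queue_alt queue
instance (queue : String) (out : String) : Decidable (Spec_mirror_queue queue out) := by unfold Spec_mirror_queue; infer_instance

-- ===== CLAIM (what is proved, stated in full; the proofs are below) =====
def Claim_equal_mirror_queue : Prop := ∀ (queue : String), Dom_mirror_queue queue → Pre_mirror_queue queue → Spec_mirror_queue queue (mirror_queue queue)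

-- ===== LEMMAS AND PROOFS =====

-- the mirror map, as both ports compute it pointwise
def pvMirror (c : Char) : Char := PySem.Dict.getD MIRRORPIECES c c

-- the sort key of port A
def pvKey (c : Char) : Int := PySem.Dict.getD PIECEVALS c 0

-- A's building of new_queue is the map of pvMirror
lemma newQueue_eq_map (qs : List Char) :
    qs.foldl
      (fun acc piece =>
        if PySem.Dict.contains MIRRORPIECES piece then
          acc ++ [PySem.Dict.getD MIRRORPIECES piece piece]
        else
          acc ++ [piece]) [] = qs.map pvMirror := by
  have hfun : (fun acc piece =>
      if PySem.Dict.contains MIRRORPIECES piece then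
        acc ++ [PySem.Dict.getD MIRRORPIECES piece piece]
      else
        acc ++ [piece]) = fun (acc : List Char) piece => acc ++ [pvMirror piece] := by
    funext acc piece
    by_cases h : PySem.Dict.contains MIRRORPIECES piece
    · simp [h, pvMirror]
    · have hn : MIRRORPIECES.get? piece = none := by
        rw [← Option.not_isSome_iff_eq_none, ← PySem.Dict.contains_eq_isSome_get?]
        simpa using h
      simp [h, pvMirror, PySem.Dict.getD, hn]
  rw [hfun, PySem.List.foldl_append_singleton_eq_map]
  simp

lemma pvMirror_mem_seven {c : Char} (h : c ∈ ['T', 'I', 'L', 'J', 'S', 'Z', 'O']) :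
    pvMirror c ∈ ['T', 'I', 'L', 'J', 'S', 'Z', 'O'] := by
  fin_cases h <;> decide

-- uniqueness of the sorted arrangement when equal keys force equal elements
lemma sorted_unique (key : Char → Int) :
    ∀ (l1 l2 : List Char), l1.Perm l2 →
      l1.Pairwise (fun a b => key a ≤ key b) → l2.Pairwise (fun a b => key a ≤ key b) →
      (∀ a ∈ l1, ∀ b ∈ l1, key a = key b → a = b) → l1 = l2 := by
  intro l1
  induction l1 with
  | nil => intro l2 hperm _ _ _; exact (hperm.nil_eq).symm ▸ rfl
  | cons a t1 ih =>
    intro l2 hperm hp1 hp2 hinj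
    cases l2 with
    | nil => exact absurd hperm.symm.nil_eq (by simp)
    | cons b t2 =>
      have hab : a = b := by
        have hbmem : b ∈ a :: t1 := hperm.mem_iff.mpr (by simp)
        have hamem : a ∈ b :: t2 := hperm.mem_iff.mp (by simp)
        have h1 : key a ≤ key b := by
          rcases List.mem_cons.mp hbmem with h | h
          · rw [h]
          · exact (List.pairwise_cons.mp hp1).1 b h
        have h2 : key b ≤ key a := by
          rcases List.mem_cons.mp hamem with h | h
          · rw [h]
          · exact (List.pairwise_cons.mp hp2).1 a h
        exact hinj a (by simp) b hbmem (le_antisymm h1 h2)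
      subst hab
      have ht : t1.Perm t2 := hperm.cons_inv
      have := ih t2 ht (List.pairwise_cons.mp hp1).2 (List.pairwise_cons.mp hp2).2
        (fun x hx y hy hk => hinj x (by simp [hx]) y (by simp [hy]) hk)
      rw [this]

lemma pvKey_inj :
    ∀ a ∈ ['T', 'I', 'L', 'J', 'S', 'Z', 'O'], ∀ b ∈ ['T', 'I', 'L', 'J', 'S', 'Z', 'O'],
      pvKey a = pvKey b → a = b := by
  intro a ha b hb
  fin_cases ha <;> fin_cases hb <;> decide

-- B's count dict looks up to the count of the mirrored queue
lemma counts_getD (qs : List Char) (p : Char) :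
    (qs.foldl
      (fun d piece =>
        let mirrored := PySem.Dict.getD MIRRORPIECES piece piece
        d.modify mirrored 0 (· + 1))
      (PySem.Dict.ofList [('T', 0), ('I', 0), ('L', 0), ('J', 0), ('S', 0), ('Z', 0), ('O', 0)])).getD p 0
      = ((qs.map pvMirror).count p : Int) := by
  have h := PySem.Dict.getD_foldl_modify_add_one (qs.map pvMirror)
    (PySem.Dict.ofList [('T', 0), ('I', 0), ('L', 0), ('J', 0), ('S', 0), ('Z', 0), ('O', 0)]) p
  rw [List.foldl_map] at h
  simp only [pvMirror] at h
  rw [h]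
  have h0 : (PySem.Dict.ofList
      [('T', (0:Int)), ('I', 0), ('L', 0), ('J', 0), ('S', 0), ('Z', 0), ('O', 0)]).getD p 0 = 0 := by
    have hitems : (PySem.Dict.ofList
        [('T', (0:Int)), ('I', 0), ('L', 0), ('J', 0), ('S', 0), ('Z', 0), ('O', 0)]).items
        = [('T', 0), ('I', 0), ('L', 0), ('J', 0), ('S', 0), ('Z', 0), ('O', 0)] := by rfl
    simp only [PySem.Dict.getD, PySem.Dict.get?, hitems, List.find?_cons]
    repeat' split <;> simp_all
  rw [h0, zero_add]

-- B's output is a permutation of the mirrored queue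
lemma ys_perm (zs : List Char) (hz : ∀ c ∈ zs, c ∈ ['T', 'I', 'L', 'J', 'S', 'Z', 'O']) :
    (['T', 'I', 'L', 'J', 'S', 'Z', 'O'].flatMap
      (fun p => List.replicate (zs.count p) p)).Perm zs := by
  rw [List.perm_iff_count]
  intro a
  by_cases ha : a ∈ ['T', 'I', 'L', 'J', 'S', 'Z', 'O']
  · fin_cases ha <;>
      simp [List.flatMap, List.count_append, List.count_replicate]
  · have hz0 : zs.count a = 0 := List.count_eq_zero.mpr (fun h => ha (hz a h))
    simp only [List.mem_cons, List.not_mem_nil, or_false] at ha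
    push Not at ha
    obtain ⟨h1, h2, h3, h4, h5, h6, h7⟩ := ha
    simp [List.flatMap, List.count_append, List.count_replicate, hz0,
      Ne.symm h1, Ne.symm h2, Ne.symm h3, Ne.symm h4, Ne.symm h5, Ne.symm h6, Ne.symm h7]

-- B's output is ordered by the sort key of A
lemma ys_pairwise (zs : List Char) :
    (['T', 'I', 'L', 'J', 'S', 'Z', 'O'].flatMap
      (fun p => List.replicate (zs.count p) p)).Pairwise
      (fun a b => pvKey a ≤ pvKey b) := by
  rw [List.pairwise_flatMap]
  constructor
  · intro p _
    exact List.pairwise_replicate.mpr (Or.inr le_rfl)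
  · refine List.Pairwise.imp_of_mem ?_
      (show List.Pairwise (fun a b => pvKey a ≤ pvKey b) ['T', 'I', 'L', 'J', 'S', 'Z', 'O'] by decide)
    intro p q hp hq hpq a ha b hb
    rw [List.eq_of_mem_replicate ha, List.eq_of_mem_replicate hb]
    exact hpq

-- ===== VERDICT (by name: the statement is the Claim_ definition above) =====
theorem mirror_queue_spec : Claim_equal_mirror_queue := by
  intro queue _ hpre0
  have hpre : ∀ c ∈ queue.toList, c ∈ ['T', 'I', 'L', 'J', 'S', 'Z', 'O'] := by
    intro c hc
    have := List.all_eq_true.mp hpre0 c hc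
    simpa using this
  unfold Spec_mirror_queue mirror_queue mirror_queue_alt sort_queue
  simp only [newQueue_eq_map, counts_getD, Int.toNat_natCast, String.toList_ofList]
  congr 1
  set zs := queue.toList.map pvMirror with hzs
  have hzmem : ∀ c ∈ zs, c ∈ ['T', 'I', 'L', 'J', 'S', 'Z', 'O'] := by
    intro c hc
    rw [hzs] at hc
    obtain ⟨x, hx, rfl⟩ := List.mem_map.mp hc
    exact pvMirror_mem_seven (hpre x hx)
  have hlist : ("TILJSZO".toList) = ['T', 'I', 'L', 'J', 'S', 'Z', 'O'] := by decide
  rw [hlist]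
  apply sorted_unique pvKey
  · exact (PySem.List.sorted_perm _ _ _).trans (ys_perm zs hzmem).symm
  · exact PySem.List.sorted_pairwise zs pvKey
  · exact ys_pairwise zs
  · intro a ha b hb
    have ha' := hzmem a (((PySem.List.sorted_perm zs pvKey false).mem_iff).mp ha)
    have hb' := hzmem b (((PySem.List.sorted_perm zs pvKey false).mem_iff).mp hb)
    exact pvKey_inj a ha' b hb'
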